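-- pv_equiv track=rewrite | github.com/ahaspel/britannica-edition | tools/postprocess.py | _wrap_orphan_tables
-- ===== SOURCE A (Python) =====
-- def _wrap_orphan_tables(text: str) -> str:
--     """Find runs of pipe-separated lines and wrap in {{TABLE:...}TABLE}."""
--     lines = text.split("\n")
--     result = []
--     table_lines = []
--
--     def flush_table():
--         if len(table_lines) >= 2:
--             cleaned = []
--             for line in table_lines:
--                 # Strip leading |
--                 line = line.strip()
--                 if line.startswith("|"):
--                     line = line[1:].strip()
--                 cleaned.append(line)
--             result.append("{{TABLE:" + "\n".join(cleaned) + "}TABLE}")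
--         else:
--             result.extend(table_lines)
--
--     pending_blanks = []
--     for line in lines:
--         stripped = line.strip()
--         # A table line: starts with | and has pipe separators
--         is_table_line = (
--             stripped.startswith("|")
--             and stripped.count("|") >= 1
--             and not stripped.startswith("|}")
--             and not stripped.startswith("|+")
--             and len(stripped) > 3  # avoid bare | lines
--         )
--         if is_table_line:
--             # Absorb any pending blank lines into the table run
--             if table_lines and pending_blanks:
--                 table_lines.extend(pending_blanks)
--             pending_blanks = []
--             table_lines.append(line)
--         elif stripped == "" and table_lines:
--             # Blank line while in a table run — hold it pending
--             pending_blanks.append(line)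
--         else:
--             if table_lines:
--                 flush_table()
--                 table_lines = []
--             # Pending blanks weren't followed by a table line — emit them
--             result.extend(pending_blanks)
--             pending_blanks = []
--             result.append(line)
--
--     if table_lines:
--         flush_table()
--     result.extend(pending_blanks)
--
--     return "\n".join(result)
-- ===== SOURCE B (Python) =====
-- def _is_table_line(line):
--     s = line.strip()
--     return (s.startswith("|") and s.count("|") >= 1
--             and not s.startswith("|}") and not s.startswith("|+")
--             and len(s) > 3)
--
--
-- def _clean_line(line):
--     line = line.strip()
--     if line.startswith("|"):
--         line = line[1:].strip()
--     return line
--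
--
-- def _split_trailing_nontable(seg):
--     """Split off the maximal run of non-table lines at the back of seg."""
--     k = len(seg)
--     while k > 0 and not _is_table_line(seg[k - 1]):
--         k -= 1
--     return seg[:k], seg[k:]
--
--
-- def _wrap_orphan_tables(text: str) -> str:
--     """Find runs of pipe-separated lines and wrap in {{TABLE:...}TABLE}."""
--     lines = text.split("\n")
--     out = []
--     i, n = 0, len(lines)
--     while i < n:
--         if not _is_table_line(lines[i]):
--             out.append(lines[i])
--             i += 1
--             continue
--         # segment: table lines and blank lines following the opening table line
--         j = i + 1
--         while j < n and (_is_table_line(lines[j]) or lines[j].strip() == ""):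
--             j += 1
--         # blanks strictly between table lines belong to the run;
--         # blanks after the last table line are emitted after it
--         run_rest, trail = _split_trailing_nontable(lines[i + 1:j])
--         run = [lines[i]] + run_rest
--         if len(run) >= 2:
--             out.append("{{TABLE:" + "\n".join(_clean_line(l) for l in run) + "}TABLE}")
--         else:
--             out.extend(run)
--         out.extend(trail)
--         i = j
--     return "\n".join(out)
-- ===== Notes on version B (the rewrite author's own statement) =====
-- stated objective: alternative
-- what changed: Replaces A's stateful single pass (accumulators result/table_lines/pending_blanks with a flush closure) by a segmentation scan: at each table line it takes the whole following table-or-blank segment, splits off the trailing non-table lines from the back, and emits the run token, trail and rest directly.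
import Mathlib
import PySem

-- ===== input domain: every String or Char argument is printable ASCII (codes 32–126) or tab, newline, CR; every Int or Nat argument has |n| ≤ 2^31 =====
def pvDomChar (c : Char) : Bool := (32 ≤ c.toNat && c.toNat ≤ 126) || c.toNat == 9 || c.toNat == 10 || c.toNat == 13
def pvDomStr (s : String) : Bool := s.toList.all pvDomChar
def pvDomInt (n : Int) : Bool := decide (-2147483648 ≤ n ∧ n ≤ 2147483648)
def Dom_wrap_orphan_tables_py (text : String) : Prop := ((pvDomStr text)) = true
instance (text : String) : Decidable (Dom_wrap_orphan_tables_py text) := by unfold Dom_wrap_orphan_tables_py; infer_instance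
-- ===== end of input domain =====

-- B replaces A's stateful accumulator pass (result/table_lines/pending_blanks + flush) by a
-- segmentation scan (take the table-or-blank segment, split off its trailing non-table lines,
-- emit run token/trail directly); same return value, same O(n) cost (objective: alternative).

-- ===== PORT A =====
-- the is_table_line boolean A computes from the stripped line
def pvIsTableA (stripped : String) : Bool :=
  PySem.Str.startswith stripped "|" && decide (1 ≤ PySem.Str.count stripped "|") &&
  !PySem.Str.startswith stripped "|}" && !PySem.Str.startswith stripped "|+" &&
  decide (3 < PySem.Str.len stripped)

-- body of flush_table's cleaning loop
def pvCleanA (line : String) : String :=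
  let l := PySem.Str.strip line
  if PySem.Str.startswith l "|" then PySem.Str.strip (PySem.Str.slice l (some 1) none) else l

-- flush_table: appends to result
def pvFlushA (result tableLines : List String) : List String :=
  if 2 ≤ tableLines.length then
    result ++ ["{{TABLE:" ++ PySem.Str.join "\n" (tableLines.map pvCleanA) ++ "}TABLE}"]
  else result ++ tableLines

-- one iteration of A's for-loop over (result, table_lines, pending_blanks)
def pvStepA (st : List String × List String × List String) (line : String) :
    List String × List String × List String :=
  let result := st.1
  let tableLines := st.2.1
  let pendingBlanks := st.2.2
  let stripped := PySem.Str.strip line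
  if pvIsTableA stripped then
    let tableLines := if tableLines ≠ [] ∧ pendingBlanks ≠ [] then tableLines ++ pendingBlanks else tableLines
    (result, tableLines ++ [line], [])
  else if stripped = "" ∧ tableLines ≠ [] then
    (result, tableLines, pendingBlanks ++ [line])
  else
    let result := if tableLines ≠ [] then pvFlushA result tableLines else result
    (result ++ pendingBlanks ++ [line], [], [])

def wrap_orphan_tables_py (text : String) : String :=
  let lines := (PySem.Str.split? text "\n").getD []
  let st := lines.foldl pvStepA ([], [], [])
  let result := if st.2.1 ≠ [] then pvFlushA st.1 st.2.1 else st.1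
  PySem.Str.join "\n" (result ++ st.2.2)

-- ===== PORT B =====
def pvIsTableB (line : String) : Bool :=
  let s := PySem.Str.strip line
  PySem.Str.startswith s "|" && decide (1 ≤ PySem.Str.count s "|") &&
  !PySem.Str.startswith s "|}" && !PySem.Str.startswith s "|+" &&
  decide (3 < PySem.Str.len s)

def pvCleanB (line : String) : String :=
  let l := PySem.Str.strip line
  if PySem.Str.startswith l "|" then PySem.Str.strip (PySem.Str.slice l (some 1) none) else l

-- the token (or verbatim lines) emitted for one run
def pvEmitB (run : List String) : List String :=
  if 2 ≤ run.length then ["{{TABLE:" ++ PySem.Str.join "\n" (run.map pvCleanB) ++ "}TABLE}"] else run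

-- a line belonging to the segment after an opening table line (table or blank)
def pvSegB (line : String) : Bool := pvIsTableB line || decide (PySem.Str.strip line = "")

-- _split_trailing_nontable's backwards scan: walk the reversed segment accumulating the trail
def pvBackScan : List String → List String → List String × List String
  | [], acc => ([], acc)
  | l :: rs, acc => if !pvIsTableB l then pvBackScan rs (l :: acc) else ((l :: rs).reverse, acc)

def pvSplitBack (seg : List String) : List String × List String :=
  pvBackScan seg.reverse []

def pvGoB : List String → List String
  | [] => []
  | l :: rest =>
    if pvIsTableB l then
      let seg := rest.takeWhile pvSegB
      let restAfter := rest.dropWhile pvSegB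
      let rt := pvSplitBack seg
      pvEmitB (l :: rt.1) ++ rt.2 ++ pvGoB restAfter
    else l :: pvGoB rest
termination_by ls => ls.length
decreasing_by
  · have := List.length_dropWhile_le pvSegB rest; simp; omega
  · simp

def wrap_orphan_tables_py_alt (text : String) : String :=
  PySem.Str.join "\n" (pvGoB ((PySem.Str.split? text "\n").getD []))

-- ===== PRECONDITION & SPEC =====
def Spec_wrap_orphan_tables_py (text : String) (out : String) : Prop := out = wrap_orphan_tables_py_alt text
instance (text : String) (out : String) : Decidable (Spec_wrap_orphan_tables_py text out) := by unfold Spec_wrap_orphan_tables_py; infer_instance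

-- ===== CLAIM (what is proved, stated in full; the proofs are below) =====
def Claim_equal_wrap_orphan_tables_py : Prop := ∀ (text : String), Dom_wrap_orphan_tables_py text → Spec_wrap_orphan_tables_py text (wrap_orphan_tables_py text)

-- ===== LEMMAS AND PROOFS =====

-- the two predicates coincide
theorem pvIsTableB_eq (line : String) : pvIsTableB line = pvIsTableA (PySem.Str.strip line) := rfl

-- A's final flush + trailing blanks, as a function of the loop state
def pvFinishA (st : List String × List String × List String) : List String :=
  (if st.2.1 ≠ [] then pvFlushA st.1 st.2.1 else st.1) ++ st.2.2

-- proof-side names for "drop/take the trailing non-table lines"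
def pvQ (x : String) : Bool := !pvIsTableB x
def pvRdrop (xs : List String) : List String := (List.dropWhile pvQ xs.reverse).reverse
def pvRtake (xs : List String) : List String := (List.takeWhile pvQ xs.reverse).reverse

theorem pvFlushA_eq (res tl : List String) : pvFlushA res tl = res ++ pvFlushA [] tl := by
  unfold pvFlushA; split <;> simp

theorem pvFlush_eq_emit (tl : List String) : pvFlushA [] tl = pvEmitB tl := by
  unfold pvFlushA pvEmitB
  split
  · simp; rfl
  · simp

theorem pvBackScan_eq : ∀ (rs acc : List String),
    pvBackScan rs acc = ((List.dropWhile pvQ rs).reverse, (List.takeWhile pvQ rs).reverse ++ acc) := by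
  intro rs
  induction rs with
  | nil => intro acc; simp [pvBackScan]
  | cons l rs ih =>
    intro acc
    by_cases h : pvIsTableB l
    · simp [pvBackScan, h, pvQ]
    · simp [pvBackScan, h, pvQ, ih]

theorem pvSplitBack_eq (seg : List String) : pvSplitBack seg = (pvRdrop seg, pvRtake seg) := by
  simp [pvSplitBack, pvBackScan_eq, pvRdrop, pvRtake]

theorem pvRdrop_table (pb : List String) (h : String) (ys : List String)
    (hh : pvIsTableB h = true) : pvRdrop (pb ++ h :: ys) = pb ++ h :: pvRdrop ys := by
  have hq : pvQ h = false := by simp [pvQ, hh]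
  have h1 : (pb ++ h :: ys).reverse = ys.reverse ++ (h :: pb.reverse) := by simp
  unfold pvRdrop
  rw [h1, List.dropWhile_append]
  split
  · next he =>
    rw [List.isEmpty_iff] at he
    simp [hq, he]
  · simp

theorem pvRtake_table (pb : List String) (h : String) (ys : List String)
    (hh : pvIsTableB h = true) : pvRtake (pb ++ h :: ys) = pvRtake ys := by
  have hq : pvQ h = false := by simp [pvQ, hh]
  have h1 : (pb ++ h :: ys).reverse = ys.reverse ++ (h :: pb.reverse) := by simp
  unfold pvRtake
  rw [h1, List.takeWhile_append]
  split
  · next he =>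
    have := (List.takeWhile_prefix (l := ys.reverse) pvQ).eq_of_length he
    simp [hq, this]
  · rfl

theorem pvRdrop_all (pb : List String) (hpb : ∀ x ∈ pb, pvIsTableB x = false) :
    pvRdrop pb = [] := by
  unfold pvRdrop
  rw [List.dropWhile_eq_nil_iff.mpr]
  · rfl
  · intro x hx
    simp [pvQ, hpb x (List.mem_reverse.mp hx)]

theorem pvRtake_all (pb : List String) (hpb : ∀ x ∈ pb, pvIsTableB x = false) :
    pvRtake pb = pb := by
  unfold pvRtake
  rw [List.takeWhile_eq_self_iff.mpr]
  · exact List.reverse_reverse pb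
  · intro x hx
    simp [pvQ, hpb x (List.mem_reverse.mp hx)]

-- both invariants at rest = []
theorem pvBothNil :
    (∀ res : List String, pvFinishA (List.foldl pvStepA (res, [], []) []) = res ++ pvGoB []) ∧
    (∀ (res tl pb : List String), tl ≠ [] → (∀ x ∈ pb, pvIsTableB x = false) →
      pvFinishA (List.foldl pvStepA (res, tl, pb) []) =
        res ++ pvFlushA [] (tl ++ pvRdrop (pb ++ List.takeWhile pvSegB []))
            ++ pvRtake (pb ++ List.takeWhile pvSegB [])
            ++ pvGoB (List.dropWhile pvSegB [])) := by
  constructor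
  · intro res; simp [pvFinishA, pvGoB]
  · intro res tl pb htl hpb
    simp [pvFinishA, htl, pvGoB, pvRdrop_all pb hpb, pvRtake_all pb hpb, pvFlushA_eq res tl]

-- the combined invariant: idle mode (no open run) and run mode
theorem pvBoth : ∀ (n : Nat) (rest : List String), rest.length ≤ n →
    (∀ res, pvFinishA (rest.foldl pvStepA (res, [], [])) = res ++ pvGoB rest) ∧
    (∀ res tl pb, tl ≠ [] → (∀ x ∈ pb, pvIsTableB x = false) →
      pvFinishA (rest.foldl pvStepA (res, tl, pb)) =
        res ++ pvFlushA [] (tl ++ pvRdrop (pb ++ rest.takeWhile pvSegB))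
            ++ pvRtake (pb ++ rest.takeWhile pvSegB)
            ++ pvGoB (rest.dropWhile pvSegB)) := by
  intro n
  induction n with
  | zero =>
    intro rest hlen
    have h0 : rest = [] := List.eq_nil_of_length_eq_zero (Nat.le_zero.mp hlen)
    subst h0
    exact pvBothNil
  | succ n ih =>
    intro rest hlen
    cases rest with
    | nil => exact pvBothNil
    | cons hd rest' =>
      have hlen' : rest'.length ≤ n := by simp at hlen; omega
      have IH := ih rest' hlen'
      by_cases hb : pvIsTableB hd = true
      · -- hd opens / continues a table run
        have hba : pvIsTableA (PySem.Str.strip hd) = true := hb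
        have hseg : pvSegB hd = true := by simp [pvSegB, hb]
        constructor
        · intro res
          rw [List.foldl_cons,
            show pvStepA (res, [], []) hd = (res, [hd], []) by simp [pvStepA, hba]]
          rw [IH.2 res [hd] [] (by simp) (by simp)]
          rw [pvGoB]
          simp [hb, pvSplitBack_eq, pvFlush_eq_emit]
        · intro res tl pb htl hpb
          rw [List.foldl_cons,
            show pvStepA (res, tl, pb) hd = (res, tl ++ pb ++ [hd], []) by
              by_cases hp : pb = [] <;> simp [pvStepA, hba, htl, hp]]
          rw [IH.2 res (tl ++ pb ++ [hd]) [] (by simp) (by simp)]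
          rw [List.takeWhile_cons_of_pos hseg, List.dropWhile_cons_of_pos hseg]
          rw [pvRdrop_table pb hd _ hb, pvRtake_table pb hd _ hb]
          simp
      · -- hd is not a table line
        have hba : pvIsTableA (PySem.Str.strip hd) = false := by
          rw [← pvIsTableB_eq]; exact Bool.eq_false_iff.mpr hb
        constructor
        · intro res
          rw [List.foldl_cons,
            show pvStepA (res, [], []) hd = (res ++ [hd], [], []) by
              simp [pvStepA, hba]]
          rw [IH.1 (res ++ [hd])]
          rw [pvGoB]
          simp [hb]
        · intro res tl pb htl hpb
          by_cases hblank : PySem.Str.strip hd = ""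
          · -- blank line inside a run: held pending
            have hseg : pvSegB hd = true := by simp [pvSegB, hblank]
            rw [List.foldl_cons,
              show pvStepA (res, tl, pb) hd = (res, tl, pb ++ [hd]) by
                simp [pvStepA, hblank, htl, show pvIsTableA "" = false by decide]]
            rw [IH.2 res tl (pb ++ [hd]) htl (by
              intro x hx
              rcases List.mem_append.mp hx with h | h
              · exact hpb x h
              · simp at h; subst h; rw [pvIsTableB_eq]; exact hba)]
            rw [List.takeWhile_cons_of_pos hseg, List.dropWhile_cons_of_pos hseg]
            simp
          · -- ordinary line: flush the run, emit pending blanks, then the line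
            have hseg : pvSegB hd = false := by simp [pvSegB, hb, hblank]
            rw [List.foldl_cons,
              show pvStepA (res, tl, pb) hd = (pvFlushA res tl ++ pb ++ [hd], [], []) by
                simp [pvStepA, hba, hblank, htl]]
            rw [IH.1 (pvFlushA res tl ++ pb ++ [hd])]
            rw [List.takeWhile_cons_of_neg (by simp [hseg]),
              List.dropWhile_cons_of_neg (by simp [hseg])]
            rw [pvGoB]
            simp [hb, pvRdrop_all pb hpb, pvRtake_all pb hpb, pvFlushA_eq res tl]

-- ===== VERDICT (by name: the statement is the Claim_ definition above) =====
theorem wrap_orphan_tables_py_spec : Claim_equal_wrap_orphan_tables_py := by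
  intro text _
  unfold Spec_wrap_orphan_tables_py
  have h := (pvBoth ((PySem.Str.split? text "\n").getD []).length ((PySem.Str.split? text "\n").getD []) le_rfl).1 []
  simp only [pvFinishA, List.nil_append] at h
  show PySem.Str.join "\n"
      ((if (List.foldl pvStepA ([], [], []) ((PySem.Str.split? text "\n").getD [])).2.1 ≠ [] then
          pvFlushA (List.foldl pvStepA ([], [], []) ((PySem.Str.split? text "\n").getD [])).1
            (List.foldl pvStepA ([], [], []) ((PySem.Str.split? text "\n").getD [])).2.1
        else (List.foldl pvStepA ([], [], []) ((PySem.Str.split? text "\n").getD [])).1) ++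
        (List.foldl pvStepA ([], [], []) ((PySem.Str.split? text "\n").getD [])).2.2) =
      wrap_orphan_tables_py_alt text
  rw [h]
  rfl
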